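-- pv_equiv track=rewrite | github.com/oot50674/srt_translate | module/segment_analyzer.py | _ends_with_particle
-- ===== SOURCE A (Python) =====
-- from typing import Dict, Iterable, List, Set, Tuple
--
-- def _ends_with_particle(text: str, particles: Set[str]) -> bool:
--     """조사/어미 같은 짧은 토큰으로 끝나는지 확인."""
--     stripped = text.strip()
--     if not stripped:
--         return False
--     for particle in particles:
--         if stripped.endswith(particle):
--             return True
--     return False
-- ===== SOURCE B (Python) =====
-- def _ends_with_particle(text, particles):
--     """Suffix-set variant: precompute the set of suffixes of the stripped text no longer
--     than the longest particle, then test each particle by set membership."""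
--     stripped = text.strip()
--     if not stripped:
--         return False
--     m = max((len(p) for p in particles), default=0)
--     n = len(stripped)
--     suffixes = {stripped[i:] for i in range(max(n - m, 0), n + 1)}
--     return any(p in suffixes for p in particles)
-- ===== Notes on version B (the rewrite author's own statement) =====
-- stated objective: alternative
-- what changed: Replaced the per-particle endswith scan by precomputing, once, the set of suffixes of the stripped text no longer than the longest particle, then testing each particle by set membership (the empty particle is covered naturally since the empty suffix is in the set).
import Mathlib
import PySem

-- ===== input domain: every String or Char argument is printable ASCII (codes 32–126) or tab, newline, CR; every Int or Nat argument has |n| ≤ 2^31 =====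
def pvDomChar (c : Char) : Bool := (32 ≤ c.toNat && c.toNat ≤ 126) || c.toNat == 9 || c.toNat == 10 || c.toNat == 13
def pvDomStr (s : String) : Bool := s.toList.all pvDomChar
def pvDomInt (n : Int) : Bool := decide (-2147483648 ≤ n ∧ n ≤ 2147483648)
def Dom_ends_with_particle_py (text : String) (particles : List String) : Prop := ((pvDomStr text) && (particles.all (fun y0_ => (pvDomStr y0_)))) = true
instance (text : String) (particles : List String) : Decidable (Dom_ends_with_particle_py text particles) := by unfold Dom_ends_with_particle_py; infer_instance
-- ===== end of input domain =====

-- B replaces A's per-particle endswith scan with a set of suffixes of the stripped text (bounded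
-- by the longest particle length), testing particles by set membership (alternative decomposition).

-- ===== PORT A =====
-- 'for particle in particles: if stripped.endswith(particle): return True' then 'return False'
def pvEndsLoop (stripped : String) : List String → Bool
  | [] => false
  | p :: rest => if PySem.Str.endswith stripped p then true else pvEndsLoop stripped rest

def ends_with_particle_py (text : String) (particles : List String) : Bool :=
  let stripped := PySem.Str.strip text
  if stripped == "" then false
  else pvEndsLoop stripped particles

-- ===== PORT B =====
def ends_with_particle_py_alt (text : String) (particles : List String) : Bool :=
  let stripped := PySem.Str.strip text
  if stripped == "" then false
  else
    -- m = max((len(p) for p in particles), default=0)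
    let m : Int := particles.foldl (fun acc p => max acc (PySem.Str.len p : Int)) 0
    let n : Int := (PySem.Str.len stripped : Int)
    -- {stripped[i:] for i in range(max(n - m, 0), n + 1)}
    let suffixes : PySem.Set String :=
      PySem.Set.ofList ((PySem.List.pyRange (max (n - m) 0) (n + 1) 1).map
        (fun i => PySem.Str.slice stripped (some i) none))
    -- any(p in suffixes for p in particles)
    particles.any (fun p => PySem.Set.contains suffixes p)

-- ===== PRECONDITION & SPEC =====
def Spec_ends_with_particle_py (text : String) (particles : List String) (out : Bool) : Prop := out = ends_with_particle_py_alt text particles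
instance (text : String) (particles : List String) (out : Bool) : Decidable (Spec_ends_with_particle_py text particles out) := by unfold Spec_ends_with_particle_py; infer_instance

-- ===== CLAIM (what is proved, stated in full; the proofs are below) =====
def Claim_equal_ends_with_particle_py : Prop := ∀ (text : String) (particles : List String), Dom_ends_with_particle_py text particles → Spec_ends_with_particle_py text particles (ends_with_particle_py text particles)

-- ===== LEMMAS AND PROOFS =====

-- every particle's length is bounded by the running foldl max
theorem pv_le_foldl_max (ps : List String) (acc : Int) :
    acc ≤ ps.foldl (fun acc p => max acc (PySem.Str.len p : Int)) acc ∧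
    ∀ p ∈ ps, (PySem.Str.len p : Int) ≤ ps.foldl (fun acc p => max acc (PySem.Str.len p : Int)) acc := by
  induction ps generalizing acc with
  | nil => simp
  | cons q rest ih =>
      obtain ⟨h1, h2⟩ := ih (max acc (PySem.Str.len q : Int))
      refine ⟨le_trans (le_max_left _ _) h1, ?_⟩
      intro p hp
      rcases List.mem_cons.mp hp with h | h
      · subst h; exact le_trans (le_max_right _ _) h1
      · exact h2 p h

-- a string is in the (length-bounded) suffix set iff the text ends with it,
-- provided its length is at most the bound m
theorem pv_contains_suffixes (s p : String) (m : Int)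
    (hm : (PySem.Str.len p : Int) ≤ m) :
    PySem.Set.contains
      (PySem.Set.ofList ((PySem.List.pyRange (max ((PySem.Str.len s : Int) - m) 0) ((PySem.Str.len s : Int) + 1) 1).map
        (fun i => PySem.Str.slice s (some i) none))) p = PySem.Str.endswith s p := by
  rw [Bool.eq_iff_iff]
  simp only [PySem.Set.contains_iff, PySem.Set.mem_ofList, List.mem_map,
    PySem.List.mem_pyRange_one, PySem.Str.endswith_eq, PySem.Chars.endswith_iff]
  constructor
  · rintro ⟨i, ⟨hlo, _⟩, hs⟩
    have h0 : 0 ≤ i := le_trans (le_max_right _ _) hlo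
    have h2 := congrArg String.toList hs
    rw [PySem.Str.toList_slice, PySem.Chars.slice_eq_listSlice, PySem.List.slice_from _ h0] at h2
    rw [← h2]
    exact List.drop_suffix _ _
  · intro h
    have hle := h.length_le
    have hls : s.toList.length = s.length := by simp
    have hlp : p.toList.length = p.length := by simp
    refine ⟨((s.toList.length - p.toList.length : ℕ) : Int), ⟨?_, ?_⟩, ?_⟩
    · simp only [PySem.Str.len_eq] at hm ⊢
      omega
    · simp only [PySem.Str.len_eq]
      omega
    · rw [List.suffix_iff_eq_drop] at h
      apply String.toList_inj.mp
      rw [PySem.Str.toList_slice, PySem.Chars.slice_eq_listSlice,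
        PySem.List.slice_from _ (by positivity)]
      simp only [Int.toNat_natCast]
      exact h.symm

theorem pv_loop_eq_any (s : String) (ps : List String) :
    pvEndsLoop s ps = ps.any (fun p => PySem.Str.endswith s p) := by
  induction ps with
  | nil => rfl
  | cons p rest ih =>
      simp only [pvEndsLoop, ih, List.any_cons]
      by_cases h : PySem.Str.endswith s p = true <;> simp [h]

-- any over the same list with predicates agreeing on its members
theorem pv_any_congr_mem {α : Type} (l : List α) (f g : α → Bool)
    (h : ∀ x ∈ l, f x = g x) : l.any f = l.any g := by
  induction l with
  | nil => rfl
  | cons a rest ih =>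
      simp only [List.any_cons, h a (List.mem_cons_self), ih (fun x hx => h x (List.mem_cons_of_mem a hx))]

-- ===== VERDICT (by name: the statement is the Claim_ definition above) =====
theorem ends_with_particle_py_spec : Claim_equal_ends_with_particle_py := by
  intro text particles _
  unfold Spec_ends_with_particle_py ends_with_particle_py ends_with_particle_py_alt
  by_cases h : PySem.Str.strip text == ""
  · simp [h]
  · rw [if_neg h, if_neg h]
    rw [pv_loop_eq_any]
    show _ = particles.any fun p =>
      (PySem.Set.ofList ((PySem.List.pyRange
          (max ((PySem.Str.len (PySem.Str.strip text) : Int) -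
            particles.foldl (fun acc p => max acc (PySem.Str.len p : Int)) 0) 0)
          ((PySem.Str.len (PySem.Str.strip text) : Int) + 1) 1).map
        (fun i => PySem.Str.slice (PySem.Str.strip text) (some i) none))).contains p
    exact (pv_any_congr_mem particles _ _ (fun p hp =>
      (pv_contains_suffixes (PySem.Str.strip text) p _
        ((pv_le_foldl_max particles 0).2 p hp)).symm))
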